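-- pv_equiv track=rewrite | github.com/KingICCrab/pim_mapper | validation/dram/permutation_experiments/formula_summary.py | compute_input_tile_changes
-- ===== SOURCE A (Python) =====
-- from typing import Tuple, Set
--
-- def compute_input_tile_changes(dim_l3_values: dict,
--                                 perm: Tuple[str, ...],
--                                 input_dims: Set[str] = {'C', 'P', 'Q'}) -> int:
--     """
--     通用公式: 计算 Input tile 切换次数
--
--     参数:
--         dim_l3_values: 各维度的 L3 tiling 值, e.g., {'K': 2, 'C': 4, 'P': 4, 'Q': 4}
--         perm: 维度遍历顺序 (外→内), e.g., ('K', 'C', 'P', 'Q')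
--         input_dims: Input-relevant 维度集合
--
--     规则:
--         1. 找到所有 Non-input dims (只有 K)
--         2. 对于每个 Non-input dim，检查它后面是否有 Input dims
--         3. 如果有，则该 Non-input dim 的变化会导致 Input 重复访问
--
--     公式:
--         base = ∏(所有 Input dims 的 l3 值)
--         multiplier = ∏(后面有 Input dims 的 Non-input dims 的 l3 值)
--         tile_changes = base × multiplier
--     """
--     non_input_dims = set(dim_l3_values.keys()) - input_dims
--
--     # 基础值: 所有 Input dims 的乘积
--     base = 1
--     for d in input_dims:
--         if d in dim_l3_values:
--             base *= dim_l3_values[d]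
--
--     # 乘数: 后面有 Input dims 的 Non-input dims
--     multiplier = 1
--     for d in non_input_dims:
--         if d not in perm:
--             continue
--         pos = perm.index(d)
--
--         # 检查 d 后面是否有 Input dims
--         has_input_after = False
--         for i in range(pos + 1, len(perm)):
--             if perm[i] in input_dims:
--                 # 还要检查该 Input dim 的 l3 值是否 > 1
--                 if dim_l3_values.get(perm[i], 1) > 1:
--                     has_input_after = True
--                     break
--
--         if has_input_after:
--             multiplier *= dim_l3_values[d]
--
--     return base * multiplier
-- ===== SOURCE B (Python) =====
-- from typing import Tuple, Set
--
-- def compute_input_tile_changes(dim_l3_values: dict,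
--                                 perm: Tuple[str, ...],
--                                 input_dims: Set[str] = {'C', 'P', 'Q'}) -> int:
--     # base: product of l3 values of the input dims present
--     base = 1
--     for d in input_dims:
--         if d in dim_l3_values:
--             base *= dim_l3_values[d]
--     # single right-to-left pass over perm: record, for each non-input dim,
--     # whether some input dim with l3 value > 1 occurs to its right
--     flag = {}
--     input_after = False
--     for d in reversed(perm):
--         if d not in input_dims:
--             flag[d] = input_after
--         elif dim_l3_values.get(d, 1) > 1:
--             input_after = True
--     # multiplier: product over the dict's non-input entries whose flag is set
--     multiplier = 1
--     for d, v in dim_l3_values.items():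
--         if d not in input_dims and flag.get(d, False):
--             multiplier *= v
--     return base * multiplier
-- ===== Notes on version B (the rewrite author's own statement) =====
-- stated objective: faster
-- what changed: Replaced A's per-non-input-dim perm.index lookup plus forward suffix scan by a single right-to-left pass over perm that records, per non-input dim, whether an input dim with l3 value > 1 lies to its right, followed by one product over the dict's items.
import Mathlib
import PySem

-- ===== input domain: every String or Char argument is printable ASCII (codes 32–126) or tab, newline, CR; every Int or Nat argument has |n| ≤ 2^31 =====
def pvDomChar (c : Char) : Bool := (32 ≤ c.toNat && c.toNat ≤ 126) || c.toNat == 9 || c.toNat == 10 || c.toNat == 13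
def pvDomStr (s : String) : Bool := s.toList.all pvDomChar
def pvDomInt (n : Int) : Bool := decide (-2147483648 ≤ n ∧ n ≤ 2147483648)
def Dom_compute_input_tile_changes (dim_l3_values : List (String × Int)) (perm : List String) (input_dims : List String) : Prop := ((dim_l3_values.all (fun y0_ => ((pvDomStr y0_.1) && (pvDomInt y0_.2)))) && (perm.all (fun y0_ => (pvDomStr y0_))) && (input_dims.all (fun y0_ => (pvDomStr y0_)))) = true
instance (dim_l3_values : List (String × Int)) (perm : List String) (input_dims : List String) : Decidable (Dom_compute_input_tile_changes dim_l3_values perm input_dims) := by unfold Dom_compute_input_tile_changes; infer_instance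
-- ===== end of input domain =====

-- ===== PORT A =====
-- B replaces A's per-non-input-dim index+suffix scan by one right-to-left pass over perm (objective: faster, O(k+p) vs O(k*p), measured).
-- helper: the inner "for i in range(pos + 1, len(perm)): ... break" loop of A, run over the suffix perm[pos+1:] (exact: break = first hit)
def aHasInputAfter (d : PySem.Dict String Int) (input_dims : List String) : List String → Bool
  | [] => false
  | x :: rest =>
    if input_dims.contains x then
      if d.getD x 1 > 1 then true else aHasInputAfter d input_dims rest
    else aHasInputAfter d input_dims rest

def compute_input_tile_changes (dim_l3_values : List (String × Int)) (perm : List String) (input_dims : List String) : Int :=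
  let d := PySem.Dict.mk dim_l3_values
  let non_input_dims := PySem.Set.diff (PySem.Set.ofList (PySem.Dict.keys d)) input_dims
  let base := input_dims.foldl (fun b x =>
    match d.get? x with
    | some v => b * v
    | none => b) 1
  let multiplier := non_input_dims.foldl (fun m x =>
    match PySem.List.index? perm x with
    | none => m        -- "if d not in perm: continue"
    | some pos =>
      if aHasInputAfter d input_dims (perm.drop (pos + 1)) then m * d.getD x 1 else m) 1
  base * multiplier

-- ===== PORT B =====
-- helper: Source B's "for d in reversed(perm)" loop; the recursion processes the tail (the elements to the right) first,
-- exactly as the reversed iteration does, returning the final (flag, input_after) state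
def bScan (d : PySem.Dict String Int) (input_dims : List String) : List String → PySem.Dict String Bool × Bool
  | [] => (PySem.Dict.mk [], false)
  | x :: rest =>
    let s := bScan d input_dims rest
    if !(input_dims.contains x) then (s.1.insert x s.2, s.2)
    else if d.getD x 1 > 1 then (s.1, true)
    else (s.1, s.2)

def compute_input_tile_changes_alt (dim_l3_values : List (String × Int)) (perm : List String) (input_dims : List String) : Int :=
  let d := PySem.Dict.mk dim_l3_values
  let base := input_dims.foldl (fun b x =>
    match d.get? x with
    | some v => b * v
    | none => b) 1
  let flag := (bScan d input_dims perm).1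
  let multiplier := dim_l3_values.foldl (fun m p =>
    if !(input_dims.contains p.1) && flag.getD p.1 false then m * p.2 else m) 1
  base * multiplier

-- ===== PRECONDITION & SPEC =====
-- Pre_ only states the dict-encoding invariant: dim_l3_values stands for a Python dict, whose keys are unique;
-- it excludes no input the Python A can actually receive.
def Pre_compute_input_tile_changes (dim_l3_values : List (String × Int)) (perm : List String) (input_dims : List String) : Prop :=
  (dim_l3_values.map Prod.fst).Nodup
instance (dim_l3_values : List (String × Int)) (perm : List String) (input_dims : List String) : Decidable (Pre_compute_input_tile_changes dim_l3_values perm input_dims) := by unfold Pre_compute_input_tile_changes; infer_instance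

def pvWitness_compute_input_tile_changes : (List (String × Int)) × List String × List String :=
  ([("K", 2), ("C", 4), ("P", 4), ("Q", 4)], ["K", "C", "P", "Q"], ["C", "P", "Q"])

def Spec_compute_input_tile_changes (dim_l3_values : List (String × Int)) (perm : List String) (input_dims : List String) (out : Int) : Prop := out = compute_input_tile_changes_alt dim_l3_values perm input_dims
instance (dim_l3_values : List (String × Int)) (perm : List String) (input_dims : List String) (out : Int) : Decidable (Spec_compute_input_tile_changes dim_l3_values perm input_dims out) := by unfold Spec_compute_input_tile_changes; infer_instance

-- ===== CLAIM (what is proved, stated in full; the proofs are below) =====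
def Claim_equal_compute_input_tile_changes : Prop := ∀ (dim_l3_values : List (String × Int)) (perm : List String) (input_dims : List String), Dom_compute_input_tile_changes dim_l3_values perm input_dims → Pre_compute_input_tile_changes dim_l3_values perm input_dims → Spec_compute_input_tile_changes dim_l3_values perm input_dims (compute_input_tile_changes dim_l3_values perm input_dims)

-- ===== LEMMAS AND PROOFS =====

-- the running input_after flag of B's right-to-left pass equals A's "some input dim with value > 1 occurs in this suffix"
theorem bScan_snd (d : PySem.Dict String Int) (ids : List String) (l : List String) :
    (bScan d ids l).2 = aHasInputAfter d ids l := by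
  induction l with
  | nil => rfl
  | cons x rest ih =>
    by_cases hx : x ∈ ids <;> by_cases hv : (1 : Int) < d.getD x 1 <;>
      simp [bScan, aHasInputAfter, hx, hv, ih]

-- the flag recorded for a non-input dim x equals A's condition at x's first occurrence in the list
theorem bScan_flag (d : PySem.Dict String Int) (ids : List String) (x : String)
    (hx : x ∉ ids) (l : List String) :
    (bScan d ids l).1.getD x false =
      (match PySem.List.index? l x with
       | none => false
       | some pos => aHasInputAfter d ids (l.drop (pos + 1))) := by
  induction l with
  | nil => simp [bScan, PySem.List.index?, PySem.Dict.getD, PySem.Dict.get?]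
  | cons y rest ih =>
    by_cases hyx : y = x
    · subst hyx
      rw [PySem.List.index?_cons_self]
      simp [bScan, hx, PySem.Dict.getD_insert_self, bScan_snd]
    · rw [PySem.List.index?_cons_of_ne rest hyx]
      cases hidx : PySem.List.index? rest x with
      | none =>
        rw [hidx] at ih
        by_cases hy : y ∈ ids <;> by_cases hv : (1 : Int) < d.getD y 1 <;>
          simp [bScan, hy, hv, PySem.Dict.getD_insert_of_ne _ _ _ (Ne.symm hyx), ih]
      | some pos =>
        rw [hidx] at ih
        by_cases hy : y ∈ ids <;> by_cases hv : (1 : Int) < d.getD y 1 <;>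
          simp [bScan, hy, hv, PySem.Dict.getD_insert_of_ne _ _ _ (Ne.symm hyx), ih]

-- A's fold over the distinct non-input keys equals B's fold over the dict's items, element by element
theorem fold_keys_eq_fold_items (d : PySem.Dict String Int) (ids perm : List String)
    (l : List (String × Int)) (hget : ∀ p ∈ l, d.get? p.1 = some p.2) :
    ∀ (i : Int),
      ((l.map Prod.fst).filter (fun x => !(PySem.Set.contains ids x))).foldl (fun m x =>
        match PySem.List.index? perm x with
        | none => m
        | some pos =>
          if aHasInputAfter d ids (perm.drop (pos + 1)) then m * d.getD x 1 else m) i =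
      l.foldl (fun m p =>
        if !(ids.contains p.1) && (bScan d ids perm).1.getD p.1 false then m * p.2 else m) i := by
  induction l with
  | nil => intro i; rfl
  | cons p rest ih =>
    intro i
    have hgp : d.get? p.1 = some p.2 := hget p (List.mem_cons_self ..)
    have hrest : ∀ q ∈ rest, d.get? q.1 = some q.2 := fun q hq => hget q (List.mem_cons_of_mem _ hq)
    have hgD : d.getD p.1 1 = p.2 := by simp [PySem.Dict.getD, hgp]
    by_cases hc : p.1 ∈ ids
    · simpa [List.filter_cons, PySem.Set.contains_eq_listContains, hc] using ih hrest i
    · have hflag := bScan_flag d ids p.1 hc perm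
      cases hidx : PySem.List.index? perm p.1 with
      | none =>
        rw [hidx] at hflag
        rw [PySem.List.index?_eq_idxOf?] at hidx
        simpa [List.filter_cons, PySem.Set.contains_eq_listContains, hc, hidx, hflag]
          using ih hrest i
      | some pos =>
        rw [hidx] at hflag
        rw [PySem.List.index?_eq_idxOf?] at hidx
        by_cases hafter : aHasInputAfter d ids (perm.drop (pos + 1)) = true
        · simpa [List.filter_cons, PySem.Set.contains_eq_listContains, hc, hidx, hflag, hafter,
            hgD] using ih hrest (i * p.2)
        · simp only [Bool.not_eq_true] at hafter
          simpa [List.filter_cons, PySem.Set.contains_eq_listContains, hc, hidx, hflag, hafter]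
            using ih hrest i

-- ===== VERDICT (by name: the statement is the Claim_ definition above) =====
theorem compute_input_tile_changes_spec : Claim_equal_compute_input_tile_changes := by
  intro dvals perm ids _hDom hPre
  have hnodup : (dvals.map Prod.fst).Nodup := hPre
  have hget : ∀ p ∈ dvals, (PySem.Dict.mk dvals).get? p.1 = some p.2 := by
    intro p hp
    exact PySem.Dict.get?_of_mem_items (PySem.Dict.mk dvals) (by simpa using hp)
      (by simpa [PySem.Dict.keys, PySem.Dict.items] using hnodup)
  have hmain := fold_keys_eq_fold_items (PySem.Dict.mk dvals) ids perm dvals hget 1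
  unfold Spec_compute_input_tile_changes compute_input_tile_changes compute_input_tile_changes_alt
  simp only [PySem.Set.diff, PySem.Dict.keys, PySem.Dict.items,
    PySem.Set.ofList_eq_self_of_nodup _ hnodup]
  rw [hmain]
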